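-- pv_equiv track=rewrite | github.com/TristanBoucansaud/melodies-generator | Final - Hausdorff.py | pointdroitpos
-- ===== SOURCE A (Python) =====
-- def pointdroitpos(L): #Retourne la ou les positions (dans L) du ou des points avec l'abscisse la plus élevée d'un polygone
--     MIG=[L[0]]
--     pos=[0]
--     for k in range(1,len(L)):
--         if L[k][0]>MIG[0][0]:
--             MIG=[L[k]]
--             pos=[k]
--         elif L[k][0]==MIG[0][0]:
--             MIG.append(L[k])
--             pos.append(k)
--     return(pos)
-- ===== SOURCE B (Python) =====
-- def pointdroitpos(L):
--     m = L[0][0]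
--     for p in L:
--         if p[0] > m:
--             m = p[0]
--     return [i for i, p in enumerate(L) if p[0] == m]
-- ===== Notes on version B (the rewrite author's own statement) =====
-- stated objective: simpler
-- what changed: Replaced A's single loop that rebuilds/extends a candidate-point list and its index list as it goes by two separate plain passes: first scan for the maximum x-coordinate (seeded from L[0][0], preserving the IndexError on empty input), then a comprehension collecting the indices whose x equals that maximum.
import Mathlib
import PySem

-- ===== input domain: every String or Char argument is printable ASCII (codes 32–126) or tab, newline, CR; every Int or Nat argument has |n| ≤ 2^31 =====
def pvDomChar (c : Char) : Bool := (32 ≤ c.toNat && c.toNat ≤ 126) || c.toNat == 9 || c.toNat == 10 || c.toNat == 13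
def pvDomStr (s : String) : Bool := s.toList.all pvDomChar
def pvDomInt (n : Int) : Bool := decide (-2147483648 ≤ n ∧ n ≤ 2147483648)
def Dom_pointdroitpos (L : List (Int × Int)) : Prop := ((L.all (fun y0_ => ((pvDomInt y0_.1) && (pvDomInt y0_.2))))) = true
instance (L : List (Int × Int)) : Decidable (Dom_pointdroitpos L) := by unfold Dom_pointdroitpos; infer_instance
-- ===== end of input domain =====

-- B replaces A's single accumulate-as-you-go loop by two plain passes (find max x, then collect
-- matching indices); objective: simpler. Equivalence is proved for nonempty L (A raises IndexError on []).

-- ===== PORT A =====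
-- Literal port of A: MIG=[L[0]], pos=[0]; for k in range(1,len(L)): compare L[k][0] with MIG[0][0].
def pointdroitpos (L : List (Int × Int)) : List Int :=
  let st :=
    (PySem.List.pyRange 1 (PySem.List.len L) 1).foldl
      (fun (s : List (Int × Int) × List Int) k =>
        let Lk := PySem.List.pyGetD L k (0, 0)
        if Lk.1 > (PySem.List.pyGetD s.1 0 (0, 0)).1 then ([Lk], [k])
        else if Lk.1 = (PySem.List.pyGetD s.1 0 (0, 0)).1 then (s.1 ++ [Lk], s.2 ++ [k])
        else s)
      ([PySem.List.pyGetD L 0 (0, 0)], ([0] : List Int))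
  st.2

-- ===== PORT B =====
-- Literal port of B: m = L[0][0]; one pass updating m on p[0] > m; then the enumerate-filter comprehension.
def pointdroitpos_alt (L : List (Int × Int)) : List Int :=
  let m := L.foldl (fun m p => if p.1 > m then p.1 else m) (PySem.List.pyGetD L 0 (0, 0)).1
  (PySem.List.enumerate L).foldl
    (fun (acc : List Int) ip => if ip.2.1 = m then acc ++ [ip.1] else acc) []

-- ===== PRECONDITION & SPEC =====
-- A indexes L[0] unconditionally, raising IndexError on the empty list; Pre_ excludes exactly that.
def Pre_pointdroitpos (L : List (Int × Int)) : Prop := L ≠ []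
instance (L : List (Int × Int)) : Decidable (Pre_pointdroitpos L) := by
  unfold Pre_pointdroitpos; infer_instance
def pvWitness_pointdroitpos : (List (Int × Int)) := [(1, 2), (3, 4)]
def Spec_pointdroitpos (L : List (Int × Int)) (out : List Int) : Prop := out = pointdroitpos_alt L
instance (L : List (Int × Int)) (out : List Int) : Decidable (Spec_pointdroitpos L out) := by
  unfold Spec_pointdroitpos; infer_instance

-- ===== CLAIM (what is proved, stated in full; the proofs are below) =====
def Claim_equal_pointdroitpos : Prop :=
  ∀ (L : List (Int × Int)), Dom_pointdroitpos L → Pre_pointdroitpos L →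
    Spec_pointdroitpos L (pointdroitpos L)

-- ===== LEMMAS AND PROOFS =====

-- A's loop step, on an (index, point) pair.
def stepA (s : List (Int × Int) × List Int) (ip : Int × (Int × Int)) :
    List (Int × Int) × List Int :=
  if ip.2.1 > (PySem.List.pyGetD s.1 0 (0, 0)).1 then ([ip.2], [ip.1])
  else if ip.2.1 = (PySem.List.pyGetD s.1 0 (0, 0)).1 then (s.1 ++ [ip.2], s.2 ++ [ip.1])
  else s

-- The running maximum of the x-coordinates of the points in ps, seeded with m.
def maxFrom (m : Int) (ps : List (Int × (Int × Int))) : Int :=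
  ps.foldl (fun m ip => if ip.2.1 > m then ip.2.1 else m) m

theorem le_maxFrom (m : Int) (ps : List (Int × (Int × Int))) : m ≤ maxFrom m ps := by
  induction ps generalizing m with
  | nil => simp [maxFrom]
  | cons ip ps ih =>
    simp only [maxFrom, List.foldl_cons]
    split_ifs with h
    · exact le_trans (le_of_lt h) (ih ip.2.1)
    · exact ih m

-- Invariant of A's loop: given that the head of MIG has x-coordinate m, the final pos list is
-- acc (kept iff no later point beats m) followed by the indices of the pairs achieving the max.
theorem stepA_invariant (ps : List (Int × (Int × Int))) (mig : List (Int × Int))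
    (acc : List Int) (m : Int) (hmig : (PySem.List.pyGetD mig 0 (0, 0)).1 = m)
    (hne : mig ≠ []) :
    (ps.foldl stepA (mig, acc)).2 =
      (if maxFrom m ps = m then acc else []) ++
        (ps.filter (fun ip => ip.2.1 = maxFrom m ps)).map (·.1) := by
  induction ps generalizing mig acc m with
  | nil => simp [maxFrom]
  | cons ip ps ih =>
    have hM : maxFrom m (ip :: ps) =
        maxFrom (if ip.2.1 > m then ip.2.1 else m) ps := by
      simp [maxFrom]
    by_cases h1 : ip.2.1 > m
    · have hstep : stepA (mig, acc) ip = ([ip.2], [ip.1]) := by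
        simp [stepA, hmig, h1]
      have hMle := le_maxFrom ip.2.1 ps
      have hMgt : maxFrom m (ip :: ps) > m := by
        rw [hM]; simp only [h1, if_pos]; omega
      rw [List.foldl_cons, hstep,
        ih [ip.2] [ip.1] ip.2.1 (by simp [PySem.List.pyGetD_zero_cons]) (by simp)]
      have hMrw : maxFrom m (ip :: ps) = maxFrom ip.2.1 ps := by rw [hM]; simp [h1]
      rw [hMrw, List.filter_cons]
      have hnm : ¬ maxFrom ip.2.1 ps = m := by omega
      by_cases h2 : ip.2.1 = maxFrom ip.2.1 ps
      · have hd : (decide (ip.2.1 = maxFrom ip.2.1 ps)) = true := by simpa using h2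
        rw [if_pos h2.symm, if_neg hnm, hd]
        simp
      · have hd : (decide (ip.2.1 = maxFrom ip.2.1 ps)) = false := by simpa using h2
        rw [if_neg (fun e => h2 e.symm), if_neg hnm, hd]
        simp
    · have hM' : maxFrom m (ip :: ps) = maxFrom m ps := by
        rw [hM]; simp [h1]
      by_cases h2 : ip.2.1 = m
      · have hstep : stepA (mig, acc) ip = (mig ++ [ip.2], acc ++ [ip.1]) := by
          simp [stepA, hmig, h2]
        have hmig' : (PySem.List.pyGetD (mig ++ [ip.2]) 0 (0, 0)).1 = m := by
          cases mig with
          | nil => exact absurd rfl hne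
          | cons a t => simpa [PySem.List.pyGetD_zero_cons] using hmig
        rw [List.foldl_cons, hstep, ih (mig ++ [ip.2]) (acc ++ [ip.1]) m hmig' (by simp)]
        rw [hM']
        simp only [List.filter_cons]
        by_cases h3 : maxFrom m ps = m
        · simp [h3, h2]
        · have : ¬ ip.2.1 = maxFrom m ps := by
            have := le_maxFrom m ps; omega
          simp [h3, this]
      · have hstep : stepA (mig, acc) ip = (mig, acc) := by
          simp [stepA, hmig, h1, h2]
        rw [List.foldl_cons, hstep, ih mig acc m hmig hne, hM']
        have : ¬ ip.2.1 = maxFrom m ps := by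
          have := le_maxFrom m ps; omega
        simp [this]

-- A's pyRange/pyGetD loop over indices 1..len-1 is the stepA fold over enumerate of the tail.
theorem A_eq_enumerate_fold (p : Int × Int) (t : List (Int × Int)) :
    pointdroitpos (p :: t) = ((PySem.List.enumerate t 1).foldl stepA ([p], [0])).2 := by
  have henum := PySem.List.enumerate_eq_map_pyRange (xs := p :: t) (d := ((0, 0) : Int × Int))
  have hlen : (0 : Int) < PySem.List.len (p :: t) := by
    simp [PySem.List.len_eq]
  rw [PySem.List.pyRange_one_cons hlen] at henum
  have henum' : (PySem.List.pyRange 1 (PySem.List.len (p :: t)) 1).map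
      (fun j => (j, PySem.List.pyGetD (p :: t) j (0, 0))) = PySem.List.enumerate t 1 := by
    have : PySem.List.enumerate (p :: t) 0 = (0, p) :: PySem.List.enumerate t 1 := by
      simp [PySem.List.enumerate_cons]
    rw [this] at henum
    simpa [PySem.List.pyGetD_zero_cons, List.map_cons] using henum.symm
  simp only [pointdroitpos]
  rw [← henum', List.foldl_map]
  have hinit : PySem.List.pyGetD (p :: t) 0 ((0 : Int), (0 : Int)) = p := by
    simp [PySem.List.pyGetD_zero_cons]
  rw [hinit]
  rfl

-- B's enumerate/filter pass, in closed form.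
theorem B_closed (p : Int × Int) (t : List (Int × Int)) :
    pointdroitpos_alt (p :: t) =
      ((PySem.List.enumerate (p :: t) 0).filter
        (fun ip => ip.2.1 = maxFrom p.1 (PySem.List.enumerate t 1))).map (·.1) := by
  have hmax : (p :: t).foldl (fun m q => if q.1 > m then q.1 else m)
      (PySem.List.pyGetD (p :: t) 0 (0, 0)).1 = maxFrom p.1 (PySem.List.enumerate t 1) := by
    have hsnd := PySem.List.map_snd_enumerate (xs := t) (s := (1 : Int))
    calc (p :: t).foldl (fun m q => if q.1 > m then q.1 else m)
          (PySem.List.pyGetD (p :: t) 0 (0, 0)).1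
        = t.foldl (fun m q => if q.1 > m then q.1 else m) p.1 := by
          simp [PySem.List.pyGetD_zero_cons]
      _ = ((PySem.List.enumerate t 1).map (·.2)).foldl
            (fun m q => if q.1 > m then q.1 else m) p.1 := by rw [hsnd]
      _ = maxFrom p.1 (PySem.List.enumerate t 1) := by
          rw [List.foldl_map]; rfl
  simp only [pointdroitpos_alt]
  rw [hmax]
  have h := PySem.List.foldl_append_if
    (l := PySem.List.enumerate (p :: t) 0)
    (p := fun ip : Int × (Int × Int) => decide (ip.2.1 = maxFrom p.1 (PySem.List.enumerate t 1)))
    (f := fun ip : Int × (Int × Int) => ip.1) (acc := ([] : List Int))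
  simpa using h

-- ===== VERDICT (by name: the statement is the Claim_ definition above) =====
theorem pointdroitpos_spec : Claim_equal_pointdroitpos := by
  intro L _ hpre
  cases L with
  | nil => exact absurd rfl hpre
  | cons p t =>
    show pointdroitpos (p :: t) = pointdroitpos_alt (p :: t)
    rw [A_eq_enumerate_fold, B_closed,
      stepA_invariant (PySem.List.enumerate t 1) [p] [0] p.1
        (by simp [PySem.List.pyGetD_zero_cons]) (by simp)]
    rw [PySem.List.enumerate_cons]
    simp only [List.filter_cons]
    have := le_maxFrom p.1 (PySem.List.enumerate t 1)
    by_cases h : maxFrom p.1 (PySem.List.enumerate t 1) = p.1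
    · simp [h]
    · have : ¬ p.1 = maxFrom p.1 (PySem.List.enumerate t 1) := fun e => h e.symm
      simp [h, this]
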